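-- pv_equiv track=rewrite | github.com/alinali87/leetcode | 2022/w37/min_money_before_tr.py | minimumMoney
-- ===== SOURCE A (Python) =====
-- from typing import List
--
-- def minimumMoney(transactions: List[List[int]]) -> int:
--     worst_order = sorted(transactions, key=lambda x: (1 if x[1] - x[0] >= 0 else 0, -x[0] if x[1] - x[0] >= 0 else x[1]))
--     cummin = 0
--     acc = 0
--     for pair in worst_order:
--         acc = acc - pair[0]
--         cummin = min(cummin, acc)
--         acc = acc + pair[1]
--     if cummin < 0:
--         return -cummin
--     return 0
-- ===== SOURCE B (Python) =====
-- def minimumMoney(transactions):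
--     # No sorting: total loss = sum of (cost - cashback) over losing transactions;
--     # answer = max(0, loss + max over transactions of min(cost, cashback)).
--     if not transactions:
--         return 0
--     loss = sum(t[0] - t[1] for t in transactions if t[1] < t[0])
--     best = max(min(t[0], t[1]) for t in transactions)
--     return max(0, loss + best)
-- ===== Notes on version B (the rewrite author's own statement) =====
-- stated objective: alternative
-- what changed: Replaced the sort-by-worst-order-then-simulate algorithm by a direct computation: total loss sum(cost-cashback over losing transactions) plus the maximum of min(cost,cashback), clamped at 0.
import Mathlib
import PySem

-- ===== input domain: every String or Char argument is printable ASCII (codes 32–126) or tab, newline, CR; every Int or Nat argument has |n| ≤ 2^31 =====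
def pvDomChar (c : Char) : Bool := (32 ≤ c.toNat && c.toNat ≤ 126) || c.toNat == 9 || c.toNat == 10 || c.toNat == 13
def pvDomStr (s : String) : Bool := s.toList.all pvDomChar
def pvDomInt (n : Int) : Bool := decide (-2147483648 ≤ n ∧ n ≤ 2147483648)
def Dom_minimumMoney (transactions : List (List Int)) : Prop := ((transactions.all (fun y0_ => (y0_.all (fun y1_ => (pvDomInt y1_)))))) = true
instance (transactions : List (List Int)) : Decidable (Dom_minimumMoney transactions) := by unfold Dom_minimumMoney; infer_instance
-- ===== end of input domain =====

-- B replaces A's sort-then-simulate by a direct computation: answer = max(0, Σmax(0,cost-cashback) + max_t min(cost_t, cashback_t)).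

-- ===== PORT A =====
def minimumMoney (transactions : List (List Int)) : Int :=
  let worst_order := PySem.List.sorted2 transactions
    (fun x => if 0 ≤ (PySem.List.pyGet? x 1).getD 0 - (PySem.List.pyGet? x 0).getD 0 then (1 : Int) else 0)
    (fun x => if 0 ≤ (PySem.List.pyGet? x 1).getD 0 - (PySem.List.pyGet? x 0).getD 0 then -((PySem.List.pyGet? x 0).getD 0) else (PySem.List.pyGet? x 1).getD 0)
    false
  let r := worst_order.foldl (fun (s : Int × Int) pair =>
      let acc1 := s.2 - (PySem.List.pyGet? pair 0).getD 0
      let cummin := min s.1 acc1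
      (cummin, acc1 + (PySem.List.pyGet? pair 1).getD 0)) ((0 : Int), (0 : Int))
  if r.1 < 0 then -r.1 else 0

-- ===== PORT B =====
def minimumMoney_alt (transactions : List (List Int)) : Int :=
  if transactions.isEmpty then 0
  else
    let loss := ((transactions.filter (fun t =>
        decide ((PySem.List.pyGet? t 1).getD 0 < (PySem.List.pyGet? t 0).getD 0))).map
        (fun t => (PySem.List.pyGet? t 0).getD 0 - (PySem.List.pyGet? t 1).getD 0)).sum
    let best := (PySem.List.max? (transactions.map
        (fun t => min ((PySem.List.pyGet? t 0).getD 0) ((PySem.List.pyGet? t 1).getD 0)))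
        (fun y => y)).getD 0
    max 0 (loss + best)

-- ===== PRECONDITION & SPEC =====
-- Pre_ excludes exactly the inputs where the Python raises IndexError: an inner list with fewer than 2 elements.
def Pre_minimumMoney (transactions : List (List Int)) : Prop :=
  ∀ t ∈ transactions, 2 ≤ t.length
instance (transactions : List (List Int)) : Decidable (Pre_minimumMoney transactions) := by unfold Pre_minimumMoney; infer_instance
def pvWitness_minimumMoney : List (List Int) := [[4, 2], [1, 3], [5, 0]]

def Spec_minimumMoney (transactions : List (List Int)) (out : Int) : Prop := out = minimumMoney_alt transactions
instance (transactions : List (List Int)) (out : Int) : Decidable (Spec_minimumMoney transactions out) := by unfold Spec_minimumMoney; infer_instance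

-- ===== CLAIM (what is proved, stated in full; the proofs are below) =====
def Claim_equal_minimumMoney : Prop := ∀ (transactions : List (List Int)), Dom_minimumMoney transactions → Pre_minimumMoney transactions → Spec_minimumMoney transactions (minimumMoney transactions)

-- ===== LEMMAS AND PROOFS =====

-- cost and cashback of a transaction, as both ports read them
def pvCost (t : List Int) : Int := (PySem.List.pyGet? t 0).getD 0
def pvCash (t : List Int) : Int := (PySem.List.pyGet? t 1).getD 0
-- A's sort key, packaged as one lexicographic key
def pvKey (t : List Int) : Lex (Int × Int) :=
  toLex ((if 0 ≤ pvCash t - pvCost t then (1 : Int) else 0),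
         (if 0 ≤ pvCash t - pvCost t then -pvCost t else pvCash t))
-- A's loop body, named (definitionally equal to the lambda in port A)
def pvStepA (s : Int × Int) (pair : List Int) : Int × Int :=
  (min s.1 (s.2 - pvCost pair), s.2 - pvCost pair + pvCash pair)
-- loss contribution and min(cost, cashback) of a transaction
def pvL (t : List Int) : Int := if pvCash t < pvCost t then pvCost t - pvCash t else 0
def pvM (t : List Int) : Int := min (pvCost t) (pvCash t)
def pvLoss (l : List (List Int)) : Int := (l.map pvL).sum
def pvBest (l : List (List Int)) (z : Int) : Int := l.foldl (fun acc t => max acc (pvM t)) z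
-- max over x :: l of (cost_i + sum over j < i of (cost_j - cashback_j))
def pvMx : List Int → List (List Int) → Int
  | x, [] => pvCost x
  | x, y :: l => max (pvCost x) ((pvCost x - pvCash x) + pvMx y l)
def pvTop : List (List Int) → Option Int
  | [] => none
  | x :: l => some (pvBest l (pvM x))

lemma pv_sorted2_eq_sorted (xs : List (List Int)) (k1 k2 : List Int → Int) :
    PySem.List.sorted2 xs k1 k2 false = PySem.List.sorted xs (fun t => toLex (k1 t, k2 t)) false := by
  unfold PySem.List.sorted2 PySem.List.sorted
  simp only [Bool.false_eq_true, if_false]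
  congr 1
  funext acc x
  congr 1
  funext a b
  rw [Bool.eq_iff_iff]
  simp only [Bool.or_eq_true, Bool.and_eq_true, Bool.not_eq_true', decide_eq_true_eq,
    decide_eq_false_iff_not, Prod.Lex.lt_iff, ofLex_toLex]
  constructor
  · rintro (h | ⟨h1, h2⟩)
    · exact Or.inl h
    · rcases lt_or_eq_of_le (not_lt.mp h1) with h' | h'
      · exact Or.inl h'
      · exact Or.inr ⟨h', h2⟩
  · rintro (h | ⟨h1, h2⟩)
    · exact Or.inl h
    · exact Or.inr ⟨by omega, h2⟩

lemma pv_foldA_cons (l : List (List Int)) : ∀ (x : List Int) (cm a : Int),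
    ((x :: l).foldl pvStepA (cm, a)).1 = min cm (a - pvMx x l) := by
  induction l with
  | nil => intro x cm a; simp [pvStepA, pvMx]
  | cons y t ih =>
    intro x cm a
    rw [List.foldl_cons, show pvStepA (cm, a) x =
      (min cm (a - pvCost x), a - pvCost x + pvCash x) from rfl, ih]
    simp only [pvMx]
    omega

lemma pv_best_max (l : List (List Int)) : ∀ u v : Int, pvBest l (max u v) = max u (pvBest l v) := by
  induction l with
  | nil => intro u v; simp [pvBest]
  | cons y t ih =>
    intro u v
    show pvBest t (max (max u v) (pvM y)) = max u (pvBest t (max v (pvM y)))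
    rw [max_assoc, ih]

lemma pv_loss_nonneg (l : List (List Int)) : 0 ≤ pvLoss l := by
  apply List.sum_nonneg
  intro x hx
  obtain ⟨t, _, rfl⟩ := List.mem_map.mp hx
  unfold pvL
  split <;> omega

lemma pv_top_spec (x : List Int) (l : List (List Int)) :
    (pvBest l (pvM x)) ∈ (x :: l).map pvM ∧ ∀ y ∈ (x :: l).map pvM, y ≤ pvBest l (pvM x) := by
  have hb : pvBest l (pvM x) = (l.map pvM).foldl max (pvM x) := by
    rw [List.foldl_map]; rfl
  constructor
  · rcases PySem.List.foldl_max_mem (l.map pvM) (pvM x) with h | h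
    · rw [hb, h]; exact List.mem_cons_self ..
    · rw [hb]; exact List.mem_cons_of_mem _ (by rw [← hb]; rw [hb]; exact h)
  · intro y hy
    rcases List.mem_cons.mp hy with h | h
    · rw [h, hb]; exact (PySem.List.le_foldl_max (l.map pvM) (pvM x)).1
    · rw [hb]; exact (PySem.List.le_foldl_max (l.map pvM) (pvM x)).2 y h

lemma pv_top_perm {l₁ l₂ : List (List Int)} (h : l₁.Perm l₂) : pvTop l₁ = pvTop l₂ := by
  cases l₁ with
  | nil => rw [List.nil_perm] at h; rw [h]
  | cons x t =>
    cases l₂ with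
    | nil => exact absurd (List.perm_nil.mp h) (by simp)
    | cons y s =>
      simp only [pvTop, Option.some.injEq]
      obtain ⟨h1mem, h1ub⟩ := pv_top_spec x t
      obtain ⟨h2mem, h2ub⟩ := pv_top_spec y s
      have hm := h.map pvM
      exact le_antisymm (h2ub _ (hm.mem_iff.mp h1mem)) (h1ub _ (hm.mem_iff.mpr h2mem))

lemma pv_loss_perm {l₁ l₂ : List (List Int)} (h : l₁.Perm l₂) : pvLoss l₁ = pvLoss l₂ :=
  (h.map pvL).sum_eq

-- unpacking the sort-key order: x before z and x is a loss transaction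
lemma pv_key_le_losing {x z : List Int} (hx : pvCash x - pvCost x < 0) (h : pvKey x ≤ pvKey z)
    (hz : pvCash z - pvCost z < 0) : pvCash x ≤ pvCash z := by
  unfold pvKey at h
  rw [Prod.Lex.le_iff] at h
  simp only [ofLex_toLex] at h
  split_ifs at h <;> omega

-- x before z and x is a gain transaction: z gains too and costs no more
lemma pv_key_le_gaining {x z : List Int} (hx : 0 ≤ pvCash x - pvCost x) (h : pvKey x ≤ pvKey z) :
    0 ≤ pvCash z - pvCost z ∧ pvCost z ≤ pvCost x := by
  unfold pvKey at h
  rw [Prod.Lex.le_iff] at h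
  simp only [ofLex_toLex] at h
  split_ifs at h <;> omega

lemma pv_Mx_sorted (l : List (List Int)) : ∀ x : List Int,
    List.Pairwise (fun a b => pvKey a ≤ pvKey b) (x :: l) →
    pvMx x l = pvLoss (x :: l) + pvBest l (pvM x) := by
  induction l with
  | nil =>
    intro x _
    show pvCost x = pvLoss [x] + pvM x
    simp only [pvLoss, pvL, pvM, List.map_cons, List.map_nil, List.sum_cons, List.sum_nil]
    split_ifs <;> omega
  | cons y t ih =>
    intro x hp
    rw [List.pairwise_cons] at hp
    have hfirst := hp.1
    have ih' := ih y hp.2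
    show max (pvCost x) (pvCost x - pvCash x + pvMx y t) = pvLoss (x :: y :: t) + pvBest (y :: t) (pvM x)
    have hb : pvBest (y :: t) (pvM x) = max (pvM x) (pvBest t (pvM y)) := by
      show pvBest t (max (pvM x) (pvM y)) = _
      rw [pv_best_max]
    have hl : pvLoss (x :: y :: t) = pvL x + pvLoss (y :: t) := by
      simp [pvLoss]
    rw [ih', hb, hl]
    obtain ⟨hmem, hub⟩ := pv_top_spec y t
    have hS : 0 ≤ pvLoss (y :: t) := pv_loss_nonneg _
    by_cases hx : 0 ≤ pvCash x - pvCost x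
    · -- x gains: everything after it gains (so no loss) and costs no more
      have hall : ∀ z ∈ y :: t, 0 ≤ pvCash z - pvCost z ∧ pvCost z ≤ pvCost x :=
        fun z hz => pv_key_le_gaining hx (hfirst z hz)
      have hS0 : pvLoss (y :: t) = 0 := by
        apply List.sum_eq_zero
        intro v hv
        obtain ⟨z, hz, rfl⟩ := List.mem_map.mp hv
        have := (hall z hz).1
        unfold pvL
        split <;> omega
      have hBle : pvBest t (pvM y) ≤ pvCost x := by
        obtain ⟨z, hz, hzz⟩ := List.mem_map.mp hmem
        have h1 := (hall z hz).1
        have h2 := (hall z hz).2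
        rw [← hzz]
        unfold pvM
        omega
      have hLx : pvL x = 0 := by unfold pvL; split <;> omega
      have hMx : pvM x = pvCost x := by unfold pvM; omega
      rw [hS0, hLx, hMx]
      omega
    · -- x loses: pvL x = cost - cashback, pvM x = cashback
      have hLx : pvL x = pvCost x - pvCash x := by unfold pvL; split <;> omega
      have hMx : pvM x = pvCash x := by unfold pvM; omega
      rw [hLx, hMx]
      by_cases hbb : pvBest t (pvM y) < pvCash x
      · -- then nothing after x loses (a later loss has cashback ≥ x's, hence pvM ≥ pvCash x)
        have hS0 : pvLoss (y :: t) = 0 := by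
          apply List.sum_eq_zero
          intro v hv
          obtain ⟨z, hz, rfl⟩ := List.mem_map.mp hv
          unfold pvL
          split
          · next hzl =>
            exfalso
            have h1 : pvCash x ≤ pvCash z := pv_key_le_losing (by omega) (hfirst z hz) (by omega)
            have h2 : pvM z ≤ pvBest t (pvM y) := hub _ (List.mem_map_of_mem hz)
            have h3 : pvM z = pvCash z := by unfold pvM; omega
            omega
          · rfl
        rw [hS0]
        omega
      · omega

lemma pv_loss_filter (l : List (List Int)) :
    ((l.filter (fun t => decide (pvCash t < pvCost t))).map (fun t => pvCost t - pvCash t)).sum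
      = pvLoss l := by
  induction l with
  | nil => rfl
  | cons y t ih =>
    by_cases h : pvCash y < pvCost y
    · rw [List.filter_cons_of_pos (by simpa using h)]
      simp only [List.map_cons, List.sum_cons, ih, pvLoss, pvL]
      rw [if_pos h]
    · rw [List.filter_cons_of_neg (by simpa using h)]
      simp only [ih, pvLoss, List.map_cons, List.sum_cons, pvL]
      rw [if_neg h]
      omega

lemma pv_alt_eq (txs : List (List Int)) :
    minimumMoney_alt txs = (match pvTop txs with
      | none => 0
      | some bb => if 0 < pvLoss txs + bb then pvLoss txs + bb else 0) := by
  cases txs with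
  | nil => rfl
  | cons y t =>
    show max 0 ((((y :: t).filter (fun t => decide (pvCash t < pvCost t))).map
        (fun t => pvCost t - pvCash t)).sum +
        (PySem.List.max? ((y :: t).map (fun t => min (pvCost t) (pvCash t))) (fun y => y)).getD 0)
      = _
    rw [show (y :: t).map (fun t => min (pvCost t) (pvCash t)) = pvM y :: t.map pvM from rfl,
      PySem.List.max?_id_cons]
    have hbest : (t.map pvM).foldl max (pvM y) = pvBest t (pvM y) := by
      rw [List.foldl_map]; rfl
    rw [hbest, pv_loss_filter]
    simp only [pvTop, Option.getD_some]
    generalize pvLoss (y :: t) + pvBest t (pvM y) = S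
    split_ifs <;> omega

-- ===== VERDICT (by name: the statement is the Claim_ definition above) =====
theorem minimumMoney_spec : Claim_equal_minimumMoney := by
  intro txs _ _
  unfold Spec_minimumMoney minimumMoney
  rw [pv_sorted2_eq_sorted]
  show (if (List.foldl pvStepA (0, 0) (PySem.List.sorted txs pvKey false)).1 < 0
        then -(List.foldl pvStepA (0, 0) (PySem.List.sorted txs pvKey false)).1 else 0)
      = minimumMoney_alt txs
  rcases hw : PySem.List.sorted txs pvKey false with _ | ⟨x, l⟩
  · have htxs : txs = [] := (PySem.List.sorted_eq_nil_iff txs pvKey false).mp hw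
    subst htxs
    rfl
  · have hp := PySem.List.sorted_pairwise txs pvKey
    rw [hw] at hp
    have hperm := PySem.List.sorted_perm txs pvKey false
    rw [hw] at hperm
    rw [pv_foldA_cons, pv_Mx_sorted l x hp, pv_alt_eq txs, ← pv_top_perm hperm,
      ← pv_loss_perm hperm]
    simp only [pvTop]
    generalize pvLoss (x :: l) + pvBest l (pvM x) = S
    split_ifs <;> omega
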